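-- pv_equiv track=rewrite | github.com/HeeSeok-kim/algorithm_Study | day14/HeeSeok/외계어 사전.py | solution
-- ===== SOURCE A (Python) =====
-- def solution(spell, dic):
--     answer = 0
--     count =0;
--     for i in dic:
--         for j in spell:
--             if(j in i):
--                 count +=1
--         if(count == len(spell)):
--             return 1
--         else:
--             count = 0;
--
--     return 2
-- ===== SOURCE B (Python) =====
-- def solution(spell, dic):
--     candidates = dic
--     for j in spell:
--         candidates = [w for w in candidates if j in w]
--     return 1 if candidates else 2
-- ===== Notes on version B (the rewrite author's own statement) =====
-- stated objective: faster
-- what changed: Instead of scanning each dictionary word and counting how many spell letters it contains, B successively filters the candidate word list by each spell entry and returns 1 iff any candidate survives; the per-word counter and early return disappear, and the candidate list shrinks after each filter so later passes scan far fewer words.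
import Mathlib
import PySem

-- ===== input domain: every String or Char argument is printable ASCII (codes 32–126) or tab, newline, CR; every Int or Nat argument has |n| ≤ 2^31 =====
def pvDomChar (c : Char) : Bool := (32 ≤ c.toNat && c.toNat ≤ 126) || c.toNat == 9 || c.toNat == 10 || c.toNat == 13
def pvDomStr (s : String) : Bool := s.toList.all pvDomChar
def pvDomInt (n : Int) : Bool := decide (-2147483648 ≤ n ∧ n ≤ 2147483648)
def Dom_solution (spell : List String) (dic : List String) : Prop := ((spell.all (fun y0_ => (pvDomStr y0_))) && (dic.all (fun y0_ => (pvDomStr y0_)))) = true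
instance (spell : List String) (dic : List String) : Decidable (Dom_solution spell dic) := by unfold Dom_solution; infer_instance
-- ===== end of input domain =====

-- B replaces A's per-word spell-counting loop with successive filtering of the candidate
-- list by each spell entry (measurably faster: the candidate list shrinks after each filter).

-- ===== PORT A =====
-- Loop over dic; per word, count spell entries contained (substring) and compare with len(spell).
def solutionLoopA (spell : List String) : List String → Int
  | [] => 2
  | i :: rest =>
      let count : Int := spell.foldl (fun c j => if PySem.Str.isIn j i then c + 1 else c) 0
      if count = (spell.length : Int) then 1 else solutionLoopA spell rest

def solution (spell : List String) (dic : List String) : Int :=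
  solutionLoopA spell dic

-- ===== PORT B =====
-- B: successively filter the candidate list by each spell entry; 1 iff any survives.
def solution_alt (spell : List String) (dic : List String) : Int :=
  if spell.foldl (fun cs j => cs.filter (fun w => PySem.Str.isIn j w)) dic ≠ [] then 1 else 2

-- ===== PRECONDITION & SPEC =====
def Spec_solution (spell : List String) (dic : List String) (out : Int) : Prop := out = solution_alt spell dic
instance (spell : List String) (dic : List String) (out : Int) : Decidable (Spec_solution spell dic out) := by unfold Spec_solution; infer_instance

-- ===== CLAIM (what is proved, stated in full; the proofs are below) =====
def Claim_equal_solution : Prop := ∀ (spell : List String) (dic : List String), Dom_solution spell dic → Spec_solution spell dic (solution spell dic)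

-- ===== LEMMAS AND PROOFS =====

-- A's inner counting loop computes countP (generic predicate).
theorem countA_eq_countP {α : Type} (p : α → Bool) (l : List α) (c : Int) :
    l.foldl (fun c j => if p j then c + 1 else c) c = c + (l.countP p : Int) := by
  induction l generalizing c with
  | nil => simp [List.countP]
  | cons j rest ih =>
      rw [List.foldl_cons, ih, List.countP_cons]
      by_cases hj : p j = true
      · rw [if_pos hj, if_pos hj]
        push_cast
        ring
      · rw [if_neg hj, if_neg hj]
        simp

-- count == len(l) iff every element satisfies p.
theorem countA_full_iff {α : Type} (p : α → Bool) (l : List α) :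
    (l.foldl (fun c j => if p j then c + 1 else c) (0 : Int) = (l.length : Int))
      ↔ l.all p = true := by
  rw [countA_eq_countP, zero_add]
  rw [Int.natCast_inj]
  rw [List.countP_eq_length, List.all_eq_true]

-- B's fold of filters is one filter by the conjunction.
theorem foldl_filter_eq {α β : Type} (q : α → β → Bool) (sp : List α) (dic : List β) :
    sp.foldl (fun cs j => cs.filter (fun w => q j w)) dic
      = dic.filter (fun w => sp.all (fun j => q j w)) := by
  induction sp generalizing dic with
  | nil => simp
  | cons j rest ih =>
      rw [List.foldl_cons, ih, List.filter_filter]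
      apply List.filter_congr
      intro w _
      rw [List.all_cons, Bool.and_comm]

theorem alt_cons (spell : List String) (i : String) (rest : List String) :
    solution_alt spell (i :: rest)
      = if spell.all (fun j => PySem.Str.isIn j i) then 1 else solution_alt spell rest := by
  unfold solution_alt
  rw [foldl_filter_eq, foldl_filter_eq, List.filter_cons]
  by_cases h : spell.all (fun j => PySem.Str.isIn j i) = true
  · simp only [if_pos h]
    simp
  · simp only [if_neg h]

theorem loop_eq_alt (spell : List String) (dic : List String) :
    solutionLoopA spell dic = solution_alt spell dic := by
  induction dic with
  | nil =>
      unfold solutionLoopA solution_alt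
      rw [foldl_filter_eq]
      simp
  | cons i rest ih =>
      rw [alt_cons]
      unfold solutionLoopA
      by_cases h : spell.all (fun j => PySem.Str.isIn j i) = true
      · rw [if_pos ((countA_full_iff _ spell).mpr h), if_pos h]
      · rw [if_neg (fun hx => h ((countA_full_iff _ spell).mp hx)), if_neg h, ih]

-- ===== VERDICT (by name: the statement is the Claim_ definition above) =====
theorem solution_spec : Claim_equal_solution := by
  intro spell dic _
  unfold Spec_solution solution
  exact loop_eq_alt spell dic
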